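-- pv_equiv track=rewrite | github.com/baker-aviation/invoice-ai | job-parse/main.py | _guess_ext
-- ===== SOURCE A (Python) =====
-- def _guess_ext(filename: str, content_type: str) -> str:
--     fn = (filename or "").lower()
--     ct = (content_type or "").lower()
--     if fn.endswith(".pdf") or "pdf" in ct:
--         return "pdf"
--     if fn.endswith(".docx") or "wordprocessingml" in ct:
--         return "docx"
--     if fn.endswith(".txt") or "text/plain" in ct:
--         return "txt"
--     if any(fn.endswith(e) for e in (".jpg", ".jpeg", ".png", ".webp", ".gif", ".bmp", ".tiff", ".tif")):
--         return "image"
--     if any(t in ct for t in ("image/jpeg", "image/png", "image/webp", "image/gif", "image/bmp", "image/tiff")):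
--         return "image"
--     return "unknown"
-- ===== SOURCE B (Python) =====
-- # B: extract the filename's actual extension once (scan from the end to the last dot),
-- # map it to a priority index via a dict; independently take the first matching
-- # content-type token's priority; the answer is the label of the smaller index.
--
-- LABELS = ("pdf", "docx", "txt", "image", "unknown")
--
-- EXT_INDEX = {"pdf": 0, "docx": 1, "txt": 2,
--              "jpg": 3, "jpeg": 3, "png": 3, "webp": 3,
--              "gif": 3, "bmp": 3, "tiff": 3, "tif": 3}
--
-- CT_TOKENS = (("pdf", 0), ("wordprocessingml", 1), ("text/plain", 2),
--              ("image/jpeg", 3), ("image/png", 3), ("image/webp", 3),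
--              ("image/gif", 3), ("image/bmp", 3), ("image/tiff", 3))
--
--
-- def _extension(fn):
--     """Chars after the last '.', in order; None if fn has no dot."""
--     ext = []
--     for c in reversed(fn):
--         if c == ".":
--             return "".join(reversed(ext))
--         ext.append(c)
--     return None
--
--
-- def _guess_ext(filename: str, content_type: str) -> str:
--     fn = (filename or "").lower()
--     ct = (content_type or "").lower()
--     ext = _extension(fn)
--     fi = EXT_INDEX.get(ext, 4) if ext is not None else 4
--     ci = next((p for t, p in CT_TOKENS if t in ct), 4)
--     return LABELS[min(fi, ci)]
-- ===== Notes on version B (the rewrite author's own statement) =====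
-- stated objective: alternative
-- what changed: Instead of A's ordered if-chain of combined suffix-OR-substring tests, B extracts the filename's actual extension once (scan back to the last dot), maps it to a priority index through a dict, independently takes the first matching content-type token's priority, and returns the label of the smaller of the two indices.
import Mathlib
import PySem

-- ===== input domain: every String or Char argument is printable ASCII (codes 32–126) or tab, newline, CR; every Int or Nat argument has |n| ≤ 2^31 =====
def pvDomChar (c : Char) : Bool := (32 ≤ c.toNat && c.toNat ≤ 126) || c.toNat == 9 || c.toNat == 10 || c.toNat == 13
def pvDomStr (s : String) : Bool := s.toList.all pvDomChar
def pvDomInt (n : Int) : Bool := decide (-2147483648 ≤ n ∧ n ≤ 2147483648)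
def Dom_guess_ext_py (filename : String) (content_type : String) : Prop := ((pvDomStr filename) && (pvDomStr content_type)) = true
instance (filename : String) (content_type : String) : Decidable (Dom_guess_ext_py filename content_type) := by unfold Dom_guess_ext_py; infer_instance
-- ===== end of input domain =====

-- B extracts the filename's actual extension once (scan to the last dot) and maps it to a
-- priority index via a dict, takes the first matching content-type token's priority, and
-- returns the label of the smaller index — replacing A's ordered OR-test if-chain (alternative; same cost).

-- ===== PORT A =====
def guess_ext_py (filename : String) (content_type : String) : String :=
  let fn := PySem.Str.lower filename
  let ct := PySem.Str.lower content_type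
  if PySem.Str.endswith fn ".pdf" || PySem.Str.isIn "pdf" ct then "pdf"
  else if PySem.Str.endswith fn ".docx" || PySem.Str.isIn "wordprocessingml" ct then "docx"
  else if PySem.Str.endswith fn ".txt" || PySem.Str.isIn "text/plain" ct then "txt"
  else if ([".jpg", ".jpeg", ".png", ".webp", ".gif", ".bmp", ".tiff", ".tif"] : List String).any
      (fun e => PySem.Str.endswith fn e) then "image"
  else if (["image/jpeg", "image/png", "image/webp", "image/gif", "image/bmp", "image/tiff"] : List String).any
      (fun t => PySem.Str.isIn t ct) then "image"
  else "unknown"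

-- ===== PORT B =====  (transliteration of Source B; strings handled on the List Char side)
def pvLabels : List String := ["pdf", "docx", "txt", "image", "unknown"]

-- EXT_INDEX dict (keys as char lists)
def pvExtIndex : PySem.Dict (List Char) Nat :=
  PySem.Dict.mk
    [(['p','d','f'], 0), (['d','o','c','x'], 1), (['t','x','t'], 2),
     (['j','p','g'], 3), (['j','p','e','g'], 3), (['p','n','g'], 3), (['w','e','b','p'], 3),
     (['g','i','f'], 3), (['b','m','p'], 3), (['t','i','f','f'], 3), (['t','i','f'], 3)]

def pvCtTokens : List (String × Nat) :=
  [("pdf", 0), ("wordprocessingml", 1), ("text/plain", 2),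
   ("image/jpeg", 3), ("image/png", 3), ("image/webp", 3),
   ("image/gif", 3), ("image/bmp", 3), ("image/tiff", 3)]

-- _extension: walk the reversed filename collecting chars until the first '.' (= last '.' of fn)
def pvExtRev (acc : List Char) : List Char → Option (List Char)
  | [] => none
  | c :: rest => if c = '.' then some acc else pvExtRev (c :: acc) rest

-- next((p for t, p in CT_TOKENS if t in ct), 4): first matching token's priority
def pvCtIdx (ct : String) : List (String × Nat) → Nat
  | [] => 4
  | (t, p) :: rest => if PySem.Str.isIn t ct then p else pvCtIdx ct rest

def guess_ext_py_alt (filename : String) (content_type : String) : String :=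
  let fn := PySem.Str.lower filename
  let ct := PySem.Str.lower content_type
  let fi : Nat := match pvExtRev [] fn.toList.reverse with
    | none => 4
    | some ext => pvExtIndex.getD ext 4
  let ci : Nat := pvCtIdx ct pvCtTokens
  pvLabels.getD (min fi ci) "unknown"

-- ===== PRECONDITION & SPEC =====
def Spec_guess_ext_py (filename : String) (content_type : String) (out : String) : Prop := out = guess_ext_py_alt filename content_type
instance (filename : String) (content_type : String) (out : String) : Decidable (Spec_guess_ext_py filename content_type out) := by unfold Spec_guess_ext_py; infer_instance

-- ===== CLAIM =====
def Claim_equal_guess_ext_py : Prop := ∀ (filename : String) (content_type : String), Dom_guess_ext_py filename content_type → Spec_guess_ext_py filename content_type (guess_ext_py filename content_type)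

-- ===== LEMMAS AND PROOFS =====

-- pvExtRev returns the chars after the last '.' (= takeWhile (≠ '.') of the reversed list), if any dot exists
theorem pvExtRev_eq (r : List Char) : ∀ (acc : List Char),
    pvExtRev acc r = if '.' ∈ r then some ((r.takeWhile (· ≠ '.')).reverse ++ acc) else none := by
  induction r with
  | nil => intro acc; simp [pvExtRev]
  | cons c rest ih =>
    intro acc
    by_cases hc : c = '.'
    · subst hc; simp [pvExtRev]
    · rw [pvExtRev, if_neg hc, ih]
      by_cases hd : '.' ∈ rest <;>
        simp [hd, hc, Ne.symm hc]

-- (y ++ ['.']) is a prefix of r iff r starts with y and then a '.', i.e. takeWhile (≠ '.') r = y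
theorem prefix_dot_char (y : List Char) (hy : '.' ∉ y) : ∀ (r : List Char),
    ((y ++ ['.']) <+: r) ↔ ('.' ∈ r ∧ r.takeWhile (· ≠ '.') = y) := by
  induction y with
  | nil =>
    intro r
    cases r with
    | nil => simp
    | cons c r' =>
      by_cases hc : c = '.'
      · subst hc; simp [List.cons_prefix_cons]
      · simp [List.cons_prefix_cons, hc, Ne.symm hc]
  | cons a y' ih =>
    intro r
    have ha : a ≠ '.' := fun h => hy (h ▸ List.mem_cons_self)
    have hy' : '.' ∉ y' := fun h => hy (List.mem_cons_of_mem _ h)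
    cases r with
    | nil => simp
    | cons c r' =>
      by_cases hc : c = a
      · subst hc
        simp [List.cons_prefix_cons, ih hy' r', ha, Ne.symm ha]
      · by_cases hcd : c = '.'
        · subst hcd
          simp [List.cons_prefix_cons, Ne.symm hc]
        · simp [List.cons_prefix_cons, hcd, hc, Ne.symm hc]

-- when _extension found no dot, no '.'-suffix test of A can fire
theorem str_ext_none (fn : String) (x : List Char) (p : String) (hp : p.toList = '.' :: x)
    (h : pvExtRev [] fn.toList.reverse = none) : PySem.Str.endswith fn p = false := by
  rw [pvExtRev_eq] at h
  split_ifs at h with hd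
  rw [Bool.eq_false_iff]
  intro hend
  rw [PySem.Str.endswith_eq] at hend
  have hsuf := (PySem.Chars.endswith_iff _ _).mp hend
  exact hd (by simpa using hsuf.mem (by simp [hp]))

-- when _extension found ext e, A's '.'-suffix test for x fires exactly when e = x
theorem str_ext_some (fn : String) (x : List Char) (hx : '.' ∉ x) (e : List Char)
    (h : pvExtRev [] fn.toList.reverse = some e) (p : String) (hp : p.toList = '.' :: x) :
    PySem.Str.endswith fn p = (e == x) := by
  rw [pvExtRev_eq] at h
  split_ifs at h with hd
  have he : (fn.toList.reverse.takeWhile (· ≠ '.')).reverse = e := by simpa using h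
  rw [Bool.eq_iff_iff, PySem.Str.endswith_eq, PySem.Chars.endswith_iff, beq_iff_eq, hp]
  have hrev : ('.' :: x) <:+ fn.toList ↔ (x.reverse ++ ['.']) <+: fn.toList.reverse := by
    rw [← List.reverse_prefix]; simp
  rw [hrev, prefix_dot_char x.reverse (by simpa using hx)]
  constructor
  · rintro ⟨-, ht⟩
    rw [← he, ht]; simp
  · intro hex
    refine ⟨hd, ?_⟩
    have := congrArg List.reverse he
    simpa [hex] using this

-- Bool/Nat skeleton of the two programs: A's chain over the 20 test booleans, B's first-match ct index
def pvChainA (fi : Nat) (b1 b2 b3 b4 b5 b6 b7 b8 b9 : Bool) : String :=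
  if fi == 0 || b1 then "pdf"
  else if fi == 1 || b2 then "docx"
  else if fi == 2 || b3 then "txt"
  else if fi == 3 then "image"
  else if b4 || (b5 || (b6 || (b7 || (b8 || b9)))) then "image"
  else "unknown"

def pvChainC (b1 b2 b3 b4 b5 b6 b7 b8 b9 : Bool) : Nat :=
  if b1 then 0 else if b2 then 1 else if b3 then 2 else if b4 then 3 else if b5 then 3
  else if b6 then 3 else if b7 then 3 else if b8 then 3 else if b9 then 3 else 4

-- finite check: the chain equals the label of the min of the two priority indices
theorem chain_key (fi : Nat) (hfi : fi ≤ 4) (b1 b2 b3 b4 b5 b6 b7 b8 b9 : Bool) :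
    pvChainA fi b1 b2 b3 b4 b5 b6 b7 b8 b9 =
      pvLabels.getD (min fi (pvChainC b1 b2 b3 b4 b5 b6 b7 b8 b9)) "unknown" := by
  revert b1 b2 b3 b4 b5 b6 b7 b8 b9
  interval_cases fi <;> decide

theorem getD_le (e : List Char) : pvExtIndex.getD e 4 ≤ 4 := by
  simp only [pvExtIndex, PySem.Dict.getD, PySem.Dict.get?, List.find?_cons]
  repeat' split
  all_goals simp

theorem fi0 (e : List Char) : (e == ['p','d','f']) = (pvExtIndex.getD e 4 == 0) := by
  simp only [pvExtIndex, PySem.Dict.getD, PySem.Dict.get?, List.find?_cons]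
  repeat' split
  all_goals simp_all [ne_comm]

theorem fi1 (e : List Char) : (e == ['d','o','c','x']) = (pvExtIndex.getD e 4 == 1) := by
  simp only [pvExtIndex, PySem.Dict.getD, PySem.Dict.get?, List.find?_cons]
  repeat' split
  all_goals try simp_all [ne_comm]
  all_goals subst_vars
  all_goals simp_all

theorem fi2 (e : List Char) : (e == ['t','x','t']) = (pvExtIndex.getD e 4 == 2) := by
  simp only [pvExtIndex, PySem.Dict.getD, PySem.Dict.get?, List.find?_cons]
  repeat' split
  all_goals try simp_all [ne_comm]
  all_goals subst_vars
  all_goals simp_all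

theorem fi3 (e : List Char) :
    (e == ['j','p','g'] || (e == ['j','p','e','g'] || (e == ['p','n','g'] || (e == ['w','e','b','p'] ||
     (e == ['g','i','f'] || (e == ['b','m','p'] || (e == ['t','i','f','f'] || e == ['t','i','f'])))))))
      = (pvExtIndex.getD e 4 == 3) := by
  simp only [pvExtIndex, PySem.Dict.getD, PySem.Dict.get?, List.find?_cons]
  repeat' split
  all_goals try simp_all [ne_comm]
  all_goals subst_vars
  all_goals simp_all

-- ===== VERDICT =====
theorem guess_ext_py_spec : Claim_equal_guess_ext_py := by
  intro filename content_type _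
  unfold Spec_guess_ext_py guess_ext_py guess_ext_py_alt
  rcases h : pvExtRev [] (PySem.Str.lower filename).toList.reverse with _ | e
  · have e1 := str_ext_none (PySem.Str.lower filename) "pdf".toList ".pdf" (by decide) h
    have e2 := str_ext_none (PySem.Str.lower filename) "docx".toList ".docx" (by decide) h
    have e3 := str_ext_none (PySem.Str.lower filename) "txt".toList ".txt" (by decide) h
    have e4 := str_ext_none (PySem.Str.lower filename) "jpg".toList ".jpg" (by decide) h
    have e5 := str_ext_none (PySem.Str.lower filename) "jpeg".toList ".jpeg" (by decide) h
    have e6 := str_ext_none (PySem.Str.lower filename) "png".toList ".png" (by decide) h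
    have e7 := str_ext_none (PySem.Str.lower filename) "webp".toList ".webp" (by decide) h
    have e8 := str_ext_none (PySem.Str.lower filename) "gif".toList ".gif" (by decide) h
    have e9 := str_ext_none (PySem.Str.lower filename) "bmp".toList ".bmp" (by decide) h
    have e10 := str_ext_none (PySem.Str.lower filename) "tiff".toList ".tiff" (by decide) h
    have e11 := str_ext_none (PySem.Str.lower filename) "tif".toList ".tif" (by decide) h
    simp only [h, List.any_cons, List.any_nil, Bool.or_false, e1, e2, e3, e4, e5, e6, e7, e8,
      e9, e10, e11]
    exact chain_key 4 (by norm_num) _ _ _ _ _ _ _ _ _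
  · have e1 := str_ext_some (PySem.Str.lower filename) ['p','d','f'] (by decide) e h ".pdf" (by decide)
    have e2 := str_ext_some (PySem.Str.lower filename) ['d','o','c','x'] (by decide) e h ".docx" (by decide)
    have e3 := str_ext_some (PySem.Str.lower filename) ['t','x','t'] (by decide) e h ".txt" (by decide)
    have e4 := str_ext_some (PySem.Str.lower filename) ['j','p','g'] (by decide) e h ".jpg" (by decide)
    have e5 := str_ext_some (PySem.Str.lower filename) ['j','p','e','g'] (by decide) e h ".jpeg" (by decide)
    have e6 := str_ext_some (PySem.Str.lower filename) ['p','n','g'] (by decide) e h ".png" (by decide)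
    have e7 := str_ext_some (PySem.Str.lower filename) ['w','e','b','p'] (by decide) e h ".webp" (by decide)
    have e8 := str_ext_some (PySem.Str.lower filename) ['g','i','f'] (by decide) e h ".gif" (by decide)
    have e9 := str_ext_some (PySem.Str.lower filename) ['b','m','p'] (by decide) e h ".bmp" (by decide)
    have e10 := str_ext_some (PySem.Str.lower filename) ['t','i','f','f'] (by decide) e h ".tiff" (by decide)
    have e11 := str_ext_some (PySem.Str.lower filename) ['t','i','f'] (by decide) e h ".tif" (by decide)
    simp only [h, List.any_cons, List.any_nil, Bool.or_false, e1, e2, e3, e4, e5, e6, e7, e8,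
      e9, e10, e11, fi0 e, fi1 e, fi2 e, fi3 e]
    exact chain_key (pvExtIndex.getD e 4) (getD_le e) _ _ _ _ _ _ _ _ _
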